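-- pv_equiv track=rewrite | github.com/monoprimula/Pixly | goruntu_isleme/morfolojik_islemler.py | goruntu_doldur
-- ===== SOURCE A (Python) =====
-- def goruntu_doldur(goruntu, pad_size, deger=0):
--     yukseklik = len(goruntu)
--     genislik = len(goruntu[0])
--
--     # Yeni sıfırlarla dolu görüntü oluştur
--     # Orijinal görüntüyü ortasına kopyala
--     padded = [[deger for _ in range(genislik + 2 * pad_size)] for _ in range(yukseklik + 2 * pad_size)]
--
--     for i in range(yukseklik):
--         for j in range(genislik):
--             padded[i + pad_size][j + pad_size] = goruntu[i][j]
--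
--     return padded
-- ===== SOURCE B (Python) =====
-- def goruntu_doldur(goruntu, pad_size, deger=0):
--     yukseklik = len(goruntu)
--     genislik = len(goruntu[0])
--     out_w = genislik + 2 * pad_size
--     rows = []
--     for r in range(yukseklik + 2 * pad_size):
--         if r < pad_size or r >= yukseklik + pad_size:
--             # border row: all filler
--             rows.append([deger] * out_w)
--         else:
--             # interior row: filler, the original row (copied, width of first row), filler
--             rows.append([deger] * pad_size + goruntu[r - pad_size][:genislik] + [deger] * pad_size)
--     return rows
-- ===== Notes on version B (the rewrite author's own statement) =====
-- stated objective: simpler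
-- what changed: B assembles the padded image row by row (border rows as fresh filler rows, interior rows as filler++original-row-copy++filler) instead of allocating a full filler grid and patching every interior cell with a nested index-overwrite loop.
-- outside the precondition, e.g. on goruntu_doldur([[1, 2], [3]], 0, 0): A raises IndexError, B returns [[1, 2], [3]]; on goruntu_doldur([[], []], -1, 0): A returns [], B returns []
import Mathlib
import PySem

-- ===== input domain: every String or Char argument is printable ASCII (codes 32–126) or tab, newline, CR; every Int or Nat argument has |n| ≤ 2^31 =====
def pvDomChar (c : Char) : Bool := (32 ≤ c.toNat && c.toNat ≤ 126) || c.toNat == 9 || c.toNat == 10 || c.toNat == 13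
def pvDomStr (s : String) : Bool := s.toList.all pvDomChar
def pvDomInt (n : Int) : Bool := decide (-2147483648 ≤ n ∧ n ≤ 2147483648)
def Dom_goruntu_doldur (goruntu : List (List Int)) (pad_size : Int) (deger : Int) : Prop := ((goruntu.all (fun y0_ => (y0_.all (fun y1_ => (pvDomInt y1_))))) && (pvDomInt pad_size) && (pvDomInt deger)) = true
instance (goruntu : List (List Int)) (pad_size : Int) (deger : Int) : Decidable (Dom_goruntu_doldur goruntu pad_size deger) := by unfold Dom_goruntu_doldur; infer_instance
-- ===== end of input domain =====

-- B builds the padded image row by row (border filler rows, interior rows as filler++row copy++filler)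
-- instead of allocating a filler grid and patching each interior cell by a nested index-overwrite loop.

-- ===== PORT A =====
def goruntu_doldur (goruntu : List (List Int)) (pad_size : Int) (deger : Int) : List (List Int) :=
  let yukseklik : Int := goruntu.length
  let genislik : Int := (PySem.List.pyGetD goruntu 0 []).length
  let padded : List (List Int) :=
    (PySem.List.pyRange 0 (yukseklik + 2 * pad_size) 1).map
      (fun _ => (PySem.List.pyRange 0 (genislik + 2 * pad_size) 1).map (fun _ => deger))
  (PySem.List.pyRange 0 yukseklik 1).foldl
    (fun padded i =>
      (PySem.List.pyRange 0 genislik 1).foldl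
        (fun padded j =>
          PySem.List.pySetD padded (i + pad_size)
            (PySem.List.pySetD (PySem.List.pyGetD padded (i + pad_size) []) (j + pad_size)
              (PySem.List.pyGetD (PySem.List.pyGetD goruntu i []) j 0)))
        padded)
    padded

-- ===== PORT B =====
def goruntu_doldur_alt (goruntu : List (List Int)) (pad_size : Int) (deger : Int) : List (List Int) :=
  let yukseklik : Int := goruntu.length
  let genislik : Int := (PySem.List.pyGetD goruntu 0 []).length
  let out_w : Int := genislik + 2 * pad_size
  (PySem.List.pyRange 0 (yukseklik + 2 * pad_size) 1).foldl
    (fun rows r =>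
      rows ++ [if r < pad_size ∨ yukseklik + pad_size ≤ r then
                 List.replicate out_w.toNat deger
               else
                 List.replicate pad_size.toNat deger
                   ++ PySem.List.slice (PySem.List.pyGetD goruntu (r - pad_size) []) none (some genislik)
                   ++ List.replicate pad_size.toNat deger])
    []

-- ===== PRECONDITION & SPEC =====
-- Pre_ excludes the empty image and ragged images with a row shorter than the first (A raises
-- IndexError there) and negative pad_size (on which A raises whenever the first row is nonempty).
def Pre_goruntu_doldur (goruntu : List (List Int)) (pad_size : Int) (deger : Int) : Prop :=
  goruntu ≠ [] ∧ 0 ≤ pad_size ∧ ∀ row ∈ goruntu, (goruntu.headD []).length ≤ row.length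
instance (goruntu : List (List Int)) (pad_size : Int) (deger : Int) : Decidable (Pre_goruntu_doldur goruntu pad_size deger) := by unfold Pre_goruntu_doldur; infer_instance

def pvWitness_goruntu_doldur : List (List Int) × Int × Int := ([[1, 2], [3, 4]], 1, 0)

def Spec_goruntu_doldur (goruntu : List (List Int)) (pad_size : Int) (deger : Int) (out : List (List Int)) : Prop := out = goruntu_doldur_alt goruntu pad_size deger
instance (goruntu : List (List Int)) (pad_size : Int) (deger : Int) (out : List (List Int)) : Decidable (Spec_goruntu_doldur goruntu pad_size deger out) := by unfold Spec_goruntu_doldur; infer_instance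

-- ===== CLAIM (what is proved, stated in full; the proofs are below) =====
def Claim_equal_goruntu_doldur : Prop := ∀ (goruntu : List (List Int)) (pad_size : Int) (deger : Int), Dom_goruntu_doldur goruntu pad_size deger → Pre_goruntu_doldur goruntu pad_size deger → Spec_goruntu_doldur goruntu pad_size deger (goruntu_doldur goruntu pad_size deger)


-- ===== LEMMAS AND PROOFS =====

-- A's inner column loop only rewrites row ip: it equals one row-level fold written back once.
lemma pv_foldl_set_row (u : List Int → Int → List Int) (L : List Int) (ip : Int) (h0 : 0 ≤ ip) :
    ∀ m : List (List Int), ip < (m.length : Int) →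
      L.foldl (fun m j => PySem.List.pySetD m ip (u (PySem.List.pyGetD m ip []) j)) m
        = PySem.List.pySetD m ip (L.foldl u (PySem.List.pyGetD m ip [])) := by
  induction L with
  | nil =>
    intro m h
    simp only [List.foldl_nil]
    rw [PySem.List.pySetD_of_nonneg _ _ h0, PySem.List.pyGetD_eq_getElem _ _ h0 h,
        List.set_getElem_self]
  | cons j L ih =>
    intro m h
    simp only [List.foldl_cons]
    rw [ih _ (by simpa [PySem.List.length_pySetD] using h)]
    have hget : PySem.List.pyGetD (PySem.List.pySetD m ip (u (PySem.List.pyGetD m ip []) j)) ip []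
        = u (PySem.List.pyGetD m ip []) j := by
      rw [PySem.List.pySetD_of_nonneg _ _ h0,
          PySem.List.pyGetD_eq_getElem _ _ h0 (by simpa using h), List.getElem_set_self]
    rw [hget, PySem.List.pySetD_of_nonneg _ _ h0, PySem.List.pySetD_of_nonneg _ _ h0,
        PySem.List.pySetD_of_nonneg _ _ h0, List.set_set]

-- The row-level fold writes xs[0..k) into the middle of a filler row.
lemma pv_row_fold_aux (xs : List Int) (d : Int) (P G : Nat) (hG : G ≤ xs.length) :
    ∀ k, k ≤ G →
      (PySem.List.pyRange 0 (k : Int) 1).foldl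
          (fun r j => PySem.List.pySetD r (j + (P : Int)) (PySem.List.pyGetD xs j 0))
          (List.replicate P d ++ List.replicate (G + P) d)
        = List.replicate P d ++ xs.take k ++ List.replicate ((G - k) + P) d := by
  intro k
  induction k with
  | zero =>
    intro _
    simp [PySem.List.pyRange_one_eq_nil (by omega : (0:Int) ≤ 0)]
  | succ k ih =>
    intro hk
    have hk' : k ≤ G := Nat.le_of_succ_le hk
    have hcast : ((k + 1 : Nat) : Int) = (k : Int) + 1 := by push_cast; ring
    rw [hcast, PySem.List.pyRange_one_succ_right (by positivity), List.foldl_append,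
        ih hk']
    simp only [List.foldl_cons, List.foldl_nil]
    have hxk : k < xs.length := lt_of_lt_of_le hk hG
    rw [PySem.List.pySetD_of_nonneg _ _ (by positivity),
        PySem.List.pyGetD_eq_getElem xs 0 (by positivity) (by exact_mod_cast hxk)]
    have htoNat : ((k : Int) + (P : Int)).toNat = k + P := by omega
    have hidx : (Int.toNat (k : Int)) = k := by omega
    rw [htoNat]
    simp only [Int.toNat_natCast]
    have hlen : (List.replicate P d ++ xs.take k).length = P + k := by
      simp [List.length_take, Nat.min_eq_left hxk.le]
    have hGk : (G - k) + P = (((G - (k+1)) + P) + 1) := by omega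
    rw [List.append_assoc, List.append_assoc]
    rw [show List.replicate P d ++ (xs.take k ++ List.replicate (G - k + P) d)
          = (List.replicate P d ++ xs.take k) ++ List.replicate (G - k + P) d by
        simp [List.append_assoc]]
    rw [List.set_append, if_neg (by omega : ¬ (k + P < (List.replicate P d ++ xs.take k).length))]
    rw [hlen, show k + P - (P + k) = 0 by omega]
    rw [hGk, List.replicate_succ, List.set_cons_zero]
    simp only [List.append_assoc, List.append_cancel_left_eq]
    rw [← List.take_concat_get' xs k hxk, List.append_assoc]
    simp only [List.singleton_append]

-- Overwriting entry n of a range-comprehension is a pointwise if.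
lemma pv_set_map_pyRange (f : Int → List Int) (N : Int) (n : Nat) (v : List Int) :
    PySem.List.pySetD ((PySem.List.pyRange 0 N 1).map f) ((n : Int)) v
      = (PySem.List.pyRange 0 N 1).map (fun r => if r = (n : Int) then v else f r) := by
  rw [PySem.List.pySetD_of_nonneg _ _ (by positivity)]
  apply List.ext_getElem
  · simp
  · intro t h1 h2
    have ht : t < (PySem.List.pyRange 0 N 1).length := by simpa using h2
    rw [List.getElem_set]
    simp only [List.getElem_map, PySem.List.getElem_pyRange_one _ _ _ ht, Int.zero_add]
    have : (Int.toNat (n : Int)) = n := by omega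
    rw [this]
    by_cases hc : n = t
    · simp [hc]
    · rw [if_neg hc, if_neg (by exact_mod_cast fun h => hc (by exact_mod_cast h.symm))]

-- The outer loop of A, after k of Y steps, equals the first k interior rows written.
lemma pv_outer_fold (g : List (List Int)) (d : Int) (P G : Nat)
    (hrows : ∀ i : Nat, i < g.length → G ≤ (PySem.List.pyGetD g (i : Int) []).length) :
    ∀ k, k ≤ g.length →
      (PySem.List.pyRange 0 (k : Int) 1).foldl
        (fun padded i =>
          (PySem.List.pyRange 0 (G : Int) 1).foldl
            (fun padded j =>
              PySem.List.pySetD padded (i + (P : Int))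
                (PySem.List.pySetD (PySem.List.pyGetD padded (i + (P : Int)) []) (j + (P : Int))
                  (PySem.List.pyGetD (PySem.List.pyGetD g i []) j 0)))
            padded)
        ((PySem.List.pyRange 0 ((g.length : Int) + 2 * (P : Int)) 1).map
          (fun _ => List.replicate (G + 2 * P) d))
      = (PySem.List.pyRange 0 ((g.length : Int) + 2 * (P : Int)) 1).map
          (fun r => if (P : Int) ≤ r ∧ r < (k : Int) + (P : Int) then
              List.replicate P d ++ (PySem.List.pyGetD g (r - (P : Int)) []).take G
                ++ List.replicate P d
            else List.replicate (G + 2 * P) d) := by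
  intro k
  induction k with
  | zero =>
    intro _
    simp only [Nat.cast_zero]
    rw [PySem.List.pyRange_one_eq_nil (by omega : (0:Int) ≤ 0), List.foldl_nil]
    apply List.map_congr_left
    intro r hr
    rw [if_neg (by omega)]
  | succ k ih =>
    intro hk
    have hk' : k ≤ g.length := Nat.le_of_succ_le hk
    have hkY : k < g.length := hk
    have hcast : ((k + 1 : Nat) : Int) = (k : Int) + 1 := by push_cast; ring
    rw [hcast, PySem.List.pyRange_one_succ_right (by positivity), List.foldl_append,
        ih hk']
    simp only [List.foldl_cons, List.foldl_nil]
    set N : Int := (g.length : Int) + 2 * (P : Int) with hN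
    set fk : Int → List Int := fun r =>
      if (P : Int) ≤ r ∧ r < (k : Int) + (P : Int) then
        List.replicate P d ++ (PySem.List.pyGetD g (r - (P : Int)) []).take G
          ++ List.replicate P d
      else List.replicate (G + 2 * P) d with hfk
    have hip : ((k : Int) + (P : Int)) = (((k + P : Nat) : Int)) := by push_cast; ring
    have hlenmap : (((PySem.List.pyRange 0 N 1).map fk).length : Int) = N := by
      simp [PySem.List.length_pyRange_one, hN]; omega
    -- the row being extended is still untouched filler
    have hget : PySem.List.pyGetD ((PySem.List.pyRange 0 N 1).map fk) ((k : Int) + (P : Int)) []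
        = List.replicate (G + 2 * P) d := by
      rw [PySem.List.pyGetD_map_pyRange_of_nonneg fk N _ [] (by positivity) (by omega)]
      rw [hfk]; simp only []
      rw [if_neg (by omega)]
    rw [pv_foldl_set_row
          (fun row j => PySem.List.pySetD row (j + (P : Int))
            (PySem.List.pyGetD (PySem.List.pyGetD g (k : Int) []) j 0))
          (PySem.List.pyRange 0 (G : Int) 1) ((k : Int) + (P : Int)) (by omega) _
          (by rw [hlenmap, hN]; omega)]
    rw [hget]
    have hrep : List.replicate (G + 2 * P) d = List.replicate P d ++ List.replicate (G + P) d := by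
      rw [← List.replicate_add]; congr 1; omega
    rw [hrep, pv_row_fold_aux (PySem.List.pyGetD g (k : Int) []) d P G (hrows k hkY) G le_rfl]
    simp only [Nat.sub_self, Nat.zero_add]
    rw [hip, pv_set_map_pyRange fk N (k + P) _]
    apply List.map_congr_left
    intro r hr
    rw [PySem.List.mem_pyRange_one] at hr
    rw [hfk]
    simp only []
    by_cases hc : r = ((k + P : Nat) : Int)
    · rw [if_pos hc, if_pos (by omega)]
      have : r - (P : Int) = (k : Int) := by omega
      rw [this]
    · rw [if_neg hc]
      by_cases h1 : (P : Int) ≤ r ∧ r < (k : Int) + (P : Int)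
      · rw [if_pos h1, if_pos (by omega)]
      · rw [if_neg h1, if_neg (by omega)]
        exact hrep

-- ===== VERDICT (by name: the statement is the Claim_ definition above) =====
theorem goruntu_doldur_spec : Claim_equal_goruntu_doldur := by
  intro g p d hdom hpre
  obtain ⟨hne, hp, hrows⟩ := hpre
  obtain ⟨P, rfl⟩ : ∃ P : Nat, p = (P : Int) := ⟨p.toNat, (Int.toNat_of_nonneg hp).symm⟩
  obtain ⟨r0, g', rfl⟩ := List.exists_cons_of_ne_nil hne
  simp only [Spec_goruntu_doldur, goruntu_doldur, goruntu_doldur_alt]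
  set g : List (List Int) := r0 :: g' with hg
  set Y : Nat := g.length with hY
  set G : Nat := r0.length with hG
  have hhead : PySem.List.pyGetD g 0 [] = r0 := by
    rw [PySem.List.pyGetD_zero]; rfl
  have hrows' : ∀ i : Nat, i < g.length → G ≤ (PySem.List.pyGetD g (i : Int) []).length := by
    intro i hi
    rw [PySem.List.pyGetD_eq_getElem g [] (by positivity) (by exact_mod_cast hi)]
    have := hrows (g[(i : Int).toNat]) (List.getElem_mem _)
    simpa [hg] using this
  simp only [hhead]
  have hinit : ((PySem.List.pyRange 0 ((G : Int) + 2 * (P : Int)) 1).map (fun _ => d))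
      = List.replicate (G + 2 * P) d := by
    have h2 : (((G : Int) + 2 * (P : Int)) - 0).toNat = G + 2 * P := by omega
    rw [List.map_const', PySem.List.length_pyRange_one, h2]
  rw [hinit]
  have hA := pv_outer_fold g d P G hrows' Y le_rfl
  rw [← hY] at hA
  rw [hA]
  rw [PySem.List.foldl_append_singleton_eq_map
        (fun r => if r < (P : Int) ∨ (Y : Int) + (P : Int) ≤ r then
            List.replicate ((G : Int) + 2 * (P : Int)).toNat d
          else List.replicate ((P : Int)).toNat d
            ++ PySem.List.slice (PySem.List.pyGetD g (r - (P : Int)) []) none (some (G : Int))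
            ++ List.replicate ((P : Int)).toNat d)
        (PySem.List.pyRange 0 ((Y : Int) + 2 * (P : Int)) 1) []]
  rw [List.nil_append]
  apply List.map_congr_left
  intro r hr
  rw [PySem.List.mem_pyRange_one] at hr
  by_cases hc : (P : Int) ≤ r ∧ r < (Y : Int) + (P : Int)
  · rw [if_pos hc, if_neg (by omega), PySem.List.slice_to _ (by positivity)]
    simp
  · rw [if_neg hc, if_pos (by omega)]
    have h3 : ((G : Int) + 2 * (P : Int)).toNat = G + 2 * P := by omega
    rw [h3]
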